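-- pv_equiv track=rewrite | github.com/BRATTICOTHOMAS/PROGETTO_CODICE_FISCALE_BRATTICO-MILANI-CROTTI | libC.py | calcolaCodiceCognome
-- ===== SOURCE A (Python) =====
-- def calcolaCodiceCognome(cognome):
--     cognome=cognome.upper()
--     consonanti = []
--     for lettere in cognome:
--         if lettere not in "AEIOU" and len(consonanti) < 3:
--             consonanti.append(lettere)
--     if len(consonanti) < 3:
--         for lettere in cognome:
--             if lettere in "AEIOU" and len(consonanti) < 3:
--                 consonanti.append(lettere)
--
--     codice=consonanti[0] + consonanti[1] + consonanti[2]
--     return codice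
-- ===== SOURCE B (Python) =====
-- def calcolaCodiceCognome(cognome):
--     ordinate = sorted(cognome.upper(), key=lambda c: c in "AEIOU")
--     return ordinate[0] + ordinate[1] + ordinate[2]
-- ===== Notes on version B (the rewrite author's own statement) =====
-- stated objective: idiomatic
-- what changed: Replaces A's two capped accumulation passes (consonants, then vowels if short) by one stable sort keyed on vowelhood followed by taking the first three characters.
import Mathlib
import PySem

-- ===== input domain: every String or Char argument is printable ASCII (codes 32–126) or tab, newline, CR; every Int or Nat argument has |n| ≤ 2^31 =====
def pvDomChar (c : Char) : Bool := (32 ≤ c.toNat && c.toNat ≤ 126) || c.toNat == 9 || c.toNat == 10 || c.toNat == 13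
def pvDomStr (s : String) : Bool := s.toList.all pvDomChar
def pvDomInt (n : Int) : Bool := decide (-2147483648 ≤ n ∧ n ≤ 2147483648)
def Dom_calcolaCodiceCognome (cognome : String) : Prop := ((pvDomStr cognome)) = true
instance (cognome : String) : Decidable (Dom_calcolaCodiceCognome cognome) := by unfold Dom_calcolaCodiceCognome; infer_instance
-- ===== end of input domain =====

-- B: one stable sort keyed on vowelhood replaces A's two capped accumulation passes (idiomatic; same results, same IndexError domain).


-- membership of a single character in the string "AEIOU" (exact for Python's `c in "AEIOU"` on one-char c)
def pvIsVowel (c : Char) : Bool := ['A', 'E', 'I', 'O', 'U'].contains c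

-- ===== PORT A =====
def calcolaCodiceCognome (cognome : String) : String :=
  let cognomeU := PySem.Chars.upper cognome.toList
  let consonanti :=
    cognomeU.foldl
      (fun cs lettere => if (!pvIsVowel lettere) && decide (cs.length < 3) then cs ++ [lettere] else cs) []
  let consonanti :=
    if consonanti.length < 3 then
      cognomeU.foldl
        (fun cs lettere => if pvIsVowel lettere && decide (cs.length < 3) then cs ++ [lettere] else cs) consonanti
    else consonanti
  match PySem.List.pyGet? consonanti 0, PySem.List.pyGet? consonanti 1, PySem.List.pyGet? consonanti 2 with
  | some a, some b, some c => String.ofList [a, b, c]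
  | _, _, _ => ""  -- IndexError in Python; excluded by Pre_

-- ===== PORT B =====
def calcolaCodiceCognome_alt (cognome : String) : String :=
  let ordinate := PySem.List.sorted (PySem.Chars.upper cognome.toList) (fun c => pvIsVowel c) false
  -- ordinate[0] + ordinate[1] + ordinate[2]; none (Python's IndexError) is excluded by Pre_
  (((PySem.List.pyGet? ordinate 0).bind fun a =>
      (PySem.List.pyGet? ordinate 1).bind fun b =>
        (PySem.List.pyGet? ordinate 2).map fun c => String.ofList [a, b, c]).getD "")

-- ===== PRECONDITION & SPEC =====
-- Both A and B raise IndexError on strings of fewer than 3 characters; Pre_ excludes exactly those.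
def Pre_calcolaCodiceCognome (cognome : String) : Prop := 3 ≤ cognome.toList.length
instance (cognome : String) : Decidable (Pre_calcolaCodiceCognome cognome) := by
  unfold Pre_calcolaCodiceCognome; infer_instance
def pvWitness_calcolaCodiceCognome : String := "Rossi"

def Spec_calcolaCodiceCognome (cognome : String) (out : String) : Prop := out = calcolaCodiceCognome_alt cognome
instance (cognome : String) (out : String) : Decidable (Spec_calcolaCodiceCognome cognome out) := by
  unfold Spec_calcolaCodiceCognome; infer_instance

-- ===== CLAIM (what is proved, stated in full; the proofs are below) =====
def Claim_equal_calcolaCodiceCognome : Prop := ∀ (cognome : String), Dom_calcolaCodiceCognome cognome → Pre_calcolaCodiceCognome cognome → Spec_calcolaCodiceCognome cognome (calcolaCodiceCognome cognome)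

-- ===== LEMMAS AND PROOFS =====

-- A's capped accumulation loop takes the first (3 - |acc|) elements satisfying p.
theorem capFold_eq (p : Char → Bool) (u : List Char) : ∀ acc : List Char,
    u.foldl (fun cs c => if p c && decide (cs.length < 3) then cs ++ [c] else cs) acc
      = acc ++ (u.filter p).take (3 - acc.length) := by
  induction u with
  | nil => intro acc; simp
  | cons c t ih =>
    intro acc
    by_cases hp : p c = true
    · by_cases hl : acc.length < 3
      · have h3 : 3 - acc.length = (3 - (acc.length + 1)) + 1 := by omega
        rw [List.foldl_cons, if_pos (show (p c && decide (acc.length < 3)) = true by simp [hp, hl]),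
          ih (acc ++ [c])]
        simp [hp, h3, List.take_succ_cons]
      · have h0 : 3 - acc.length = 0 := by omega
        rw [List.foldl_cons,
          if_neg (show ¬ ((p c && decide (acc.length < 3)) = true) by simp [hl]), ih acc]
        simp [h0]
    · simp only [Bool.not_eq_true] at hp
      rw [List.foldl_cons,
        if_neg (show ¬ ((p c && decide (acc.length < 3)) = true) by simp [hp]), ih acc]
      simp [hp]

-- stable insertion of a false-key element goes right before the true-key block
theorem insertBy_false (key : Char → Bool) (x : Char) (hx : key x = false) :
    ∀ fs ts : List Char, (∀ y ∈ fs, key y = false) → (∀ y ∈ ts, key y = true) →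
    PySem.List.insertBy (fun a b => decide (key a < key b)) x (fs ++ ts) = fs ++ x :: ts := by
  intro fs
  induction fs with
  | nil =>
    intro ts _ hts
    cases ts with
    | nil => simp [PySem.List.insertBy]
    | cons t ts' =>
      have ht : key t = true := hts t (by simp)
      simp only [List.nil_append]
      rw [PySem.List.insertBy]
      rw [if_pos (show decide (key x < key t) = true by rw [hx, ht]; decide)]
  | cons f fs' ih =>
    intro ts hfs hts
    have hf : key f = false := hfs f (by simp)
    have : PySem.List.insertBy (fun a b => decide (key a < key b)) x (f :: (fs' ++ ts))
        = f :: PySem.List.insertBy (fun a b => decide (key a < key b)) x (fs' ++ ts) := by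
      simp [PySem.List.insertBy, hx, hf]
    simpa [this] using congrArg (f :: ·) (ih ts (fun y hy => hfs y (by simp [hy])) hts)

-- the insertion-sort fold keeps a (false-block ++ true-block) partition, appending stably
theorem sorted_partition_aux (key : Char → Bool) (u : List Char) : ∀ fs ts : List Char,
    (∀ y ∈ fs, key y = false) → (∀ y ∈ ts, key y = true) →
    u.foldl (fun acc x => PySem.List.insertBy (fun a b => decide (key a < key b)) x acc) (fs ++ ts)
      = (fs ++ u.filter (fun c => !key c)) ++ (ts ++ u.filter key) := by
  induction u with
  | nil => intro fs ts _ _; simp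
  | cons c t ih =>
    intro fs ts hfs hts
    by_cases hc : key c = true
    · have hins : PySem.List.insertBy (fun a b => decide (key a < key b)) c (fs ++ ts)
          = fs ++ (ts ++ [c]) := by
        rw [PySem.List.insertBy_of_forall_not_before, List.append_assoc]
        intro y _
        show decide (key c < key y) = false
        rw [hc]; cases hy : key y <;> decide
      have := ih fs (ts ++ [c]) hfs (by
        intro y hy; rcases List.mem_append.mp hy with h | h
        · exact hts y h
        · simp at h; simpa [h] using hc)
      simp [List.foldl_cons, hins, this, hc]
    · simp only [Bool.not_eq_true] at hc
      have hins := insertBy_false key c hc fs ts hfs hts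
      have := ih (fs ++ [c]) ts (by
        intro y hy; rcases List.mem_append.mp hy with h | h
        · exact hfs y h
        · simp at h; simpa [h] using hc) hts
      rw [List.foldl_cons, hins, show fs ++ c :: ts = (fs ++ [c]) ++ ts by simp, this]
      simp [hc, List.append_assoc]

-- stable sort on a Bool key is the stable partition: false block then true block
theorem sorted_bool_partition (key : Char → Bool) (u : List Char) :
    PySem.List.sorted u key false = u.filter (fun c => !key c) ++ u.filter key := by
  have := sorted_partition_aux key u [] [] (by simp) (by simp)
  simpa [PySem.List.sorted_eq_foldl_insertBy] using this

theorem filter_length_partition (key : Char → Bool) (u : List Char) :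
    (u.filter (fun c => !key c)).length + (u.filter key).length = u.length := by
  induction u with
  | nil => simp
  | cons c t ih => cases hc : key c <;> simp [hc] <;> omega

-- ===== VERDICT (by name: the statement is the Claim_ definition above) =====
theorem calcolaCodiceCognome_spec : Claim_equal_calcolaCodiceCognome := by
  intro cognome _ hpre
  unfold Spec_calcolaCodiceCognome calcolaCodiceCognome calcolaCodiceCognome_alt
  set u := PySem.Chars.upper cognome.toList with hu
  have hlen : 3 ≤ u.length := by
    simpa [hu, PySem.Chars.upper] using hpre
  set fs := u.filter (fun c => !pvIsVowel c) with hfs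
  set ts := u.filter (fun c => pvIsVowel c) with hts
  have hpart : fs.length + ts.length = u.length := filter_length_partition pvIsVowel u
  -- B's list
  have hsorted : PySem.List.sorted u (fun c => pvIsVowel c) false = fs ++ ts :=
    sorted_bool_partition pvIsVowel u
  -- A's first loop
  have h1 : u.foldl (fun cs c => if (!pvIsVowel c) && decide (cs.length < 3) then cs ++ [c] else cs) []
      = fs.take 3 := by
    simpa using capFold_eq (fun c => !pvIsVowel c) u []
  -- A's final list equals (fs ++ ts).take 3
  have hfinal :
      (if (fs.take 3).length < 3 then
        u.foldl (fun cs c => if pvIsVowel c && decide (cs.length < 3) then cs ++ [c] else cs) (fs.take 3)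
      else fs.take 3) = (fs ++ ts).take 3 := by
    by_cases h : (fs.take 3).length < 3
    · have hfl : fs.length < 3 := by
        have h' : (fs.take 3).length = min 3 fs.length := List.length_take; omega
      have htk : fs.take 3 = fs := List.take_of_length_le (by omega)
      rw [if_pos h, htk, capFold_eq (fun c => pvIsVowel c) u fs, List.take_append]
      have : fs.take 3 = fs := htk
      rw [this]
    · rw [if_neg h, List.take_append]
      have hfl : 3 ≤ fs.length := by
        have h' : (fs.take 3).length = min 3 fs.length := List.length_take; omega
      have : 3 - fs.length = 0 := by omega
      simp [this]
  simp only [h1, hfinal, hsorted]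
  -- now both sides index (fs ++ ts), one through take 3; length ≥ 3 so the lists start with 3 elements
  have hL : 3 ≤ (fs ++ ts).length := by simp [List.length_append]; omega
  obtain ⟨a, b, c, rest, hrest⟩ : ∃ a b c rest, fs ++ ts = a :: b :: c :: rest := by
    match hE : fs ++ ts with
    | a :: b :: c :: rest => exact ⟨a, b, c, rest, rfl⟩
    | [] | [_] | [_, _] => rw [hE] at hL; simp at hL
  rw [hrest]
  have e1 : ((0:Int) ≤ (rest.length : Int) + 1 + 1) := by omega
  have e2 : ((0:Int) ≤ (rest.length : Int) + 1) := by omega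
  have e3 : ((2:Int) ≤ (rest.length : Int) + 1 + 1) := by omega
  simp [PySem.List.pyGet?, PySem.List.pyIdx?, List.take, e1, e2, e3]
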